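-- pv_equiv track=rewrite | github.com/grapadacious/advent-of-code | events/2025/11/new.py | find_valid_nodes
-- ===== SOURCE A (Python) =====
-- def find_valid_nodes(graph: dict[str, set[str]]):
--     queue = ["out"]
--     visited = set()
--
--     while len(queue) > 0:
--         search = queue[0]
--         queue = queue[1:]
--
--         if search == "svr":
--             break
--
--         for key, value_set in graph.items():
--             if key in visited:
--                 continue
--
--             if search in value_set:
--                 visited.add(key)
--                 queue.append(key)
--
--     return visited
-- ===== SOURCE B (Python) =====
-- def find_valid_nodes(graph: dict[str, set[str]]):
--     # Reverse-adjacency index (value -> keys in graph order), then a level-by-level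
--     # frontier BFS instead of A's per-dequeue rescan of the whole graph.
--     rev = {}
--     for key, value_set in graph.items():
--         for v in value_set:
--             rev.setdefault(v, []).append(key)
--
--     visited = set()
--     frontier = ["out"]
--     while frontier:
--         nxt = []
--         for search in frontier:
--             if search == "svr":
--                 return visited
--             for key in rev.get(search, []):
--                 if key not in visited:
--                     visited.add(key)
--                     nxt.append(key)
--         frontier = nxt
--     return visited
-- ===== Notes on version B (the rewrite author's own statement) =====
-- stated objective: alternative
-- what changed: B builds a reverse-adjacency index (value -> keys) once and runs a level-by-level frontier BFS (current frontier list, next-frontier accumulator, early return on 'svr'), instead of A's FIFO queue that re-slices itself and rescans every graph entry at each dequeue.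
import Mathlib
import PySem

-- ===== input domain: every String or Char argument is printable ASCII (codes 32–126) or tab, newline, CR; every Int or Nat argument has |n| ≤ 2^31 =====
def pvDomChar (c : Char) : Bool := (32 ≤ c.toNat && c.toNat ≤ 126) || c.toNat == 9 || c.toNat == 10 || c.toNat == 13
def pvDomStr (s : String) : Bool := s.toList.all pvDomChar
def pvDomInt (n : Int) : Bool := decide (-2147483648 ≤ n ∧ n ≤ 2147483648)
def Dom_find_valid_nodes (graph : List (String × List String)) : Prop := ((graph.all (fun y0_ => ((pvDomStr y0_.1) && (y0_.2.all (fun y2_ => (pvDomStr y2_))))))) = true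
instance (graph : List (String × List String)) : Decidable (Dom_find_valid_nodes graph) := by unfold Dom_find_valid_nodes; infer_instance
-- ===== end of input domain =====

-- B builds a reverse-adjacency index once and runs a level-by-level frontier BFS,
-- instead of A's self-slicing FIFO queue that rescans the whole graph per dequeue
-- (objective: alternative).

-- number of keys of the ground list L not yet visited (termination measures only)
def fvnCnt (L : List String) (visited : List String) : Nat :=
  (L.filter (fun k => !visited.contains k)).length

-- ===== PORT A =====
-- inner 'for key, value_set in graph.items(): …' loop of A, carrying (visited, queue)
def fvnScanA (search : String) : List (String × List String) → List String → List String → List String × List String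
  | [], visited, queue => (visited, queue)
  | (key, vset) :: rest, visited, queue =>
    if visited.contains key then fvnScanA search rest visited queue
    else if vset.contains search then
      fvnScanA search rest (PySem.Set.add visited key) (queue ++ [key])
    else fvnScanA search rest visited queue

-- ----- termination lemmas cited by the ports' decreasing_by -----
theorem fvnFilterMonoLen (p q : String → Bool) (h : ∀ x, q x = true → p x = true) :
    ∀ L : List String, (L.filter q).length ≤ (L.filter p).length := by
  intro L; induction L with
  | nil => simp
  | cons a t ih =>
    simp only [List.filter_cons]
    by_cases hq : q a = true
    · simp [hq, h a hq]; omega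
    · cases hp : p a <;> simp [hq, List.length_cons] <;> omega

theorem fvnCnt_add_lt (L v : List String) (key : String) (hmem : key ∈ L)
    (hvc : v.contains key = false) :
    fvnCnt L (PySem.Set.add v key) < fvnCnt L v := by
  have hkv : key ∉ v := by simpa using hvc
  have hadd : PySem.Set.add v key = v ++ [key] := by
    simp [PySem.Set.add, List.contains_eq_mem, hkv]
  unfold fvnCnt
  rw [hadd]
  have hform : ∀ (M : List String),
      M.filter (fun k => !(v ++ [key]).contains k)
        = M.filter (fun k => !decide (k ∈ v) && !decide (k = key)) := by
    intro M; apply List.filter_congr; intro x _; simp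
  have hform0 : ∀ (M : List String),
      M.filter (fun k => !v.contains k) = M.filter (fun k => !decide (k ∈ v)) := by
    intro M; apply List.filter_congr; intro x _; simp [List.contains_eq_mem]
  rw [hform, hform0]
  induction L with
  | nil => cases hmem
  | cons a t ih =>
    simp only [List.filter_cons]
    by_cases ha : a = key
    · subst ha
      simp at *
      simp [hkv]
      have := fvnFilterMonoLen (fun k => !decide (k ∈ v))
        (fun k => !decide (k ∈ v) && !decide (k = a))
        (by intro x hx; simp at hx ⊢; exact hx.1) t
      omega
    · have hmem' : key ∈ t := by
        cases hmem with
        | head => exact absurd rfl ha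
        | tail _ h => exact h
      by_cases hav : a ∈ v
      · simp [ha, hav]; exact ih hmem'
      · simp [ha, hav]; exact ih hmem'

theorem fvnScanA_meas (L : List String) (s : String) :
    ∀ (g : List (String × List String)) (v q : List String), (∀ p ∈ g, p.1 ∈ L) →
      (fvnScanA s g v q).2.length + 2 * fvnCnt L (fvnScanA s g v q).1 ≤
        q.length + 2 * fvnCnt L v := by
  intro g
  induction g with
  | nil => intro v q _; simp [fvnScanA]
  | cons p rest ih =>
    intro v q hsub
    obtain ⟨k, vs⟩ := p
    have hk : k ∈ L := hsub (k, vs) (by simp)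
    have hsub' : ∀ p ∈ rest, p.1 ∈ L := fun x hx => hsub x (by simp [hx])
    simp only [fvnScanA]
    by_cases hv : k ∈ v
    · rw [if_pos (by simpa using hv)]
      exact ih v q hsub'
    · rw [if_neg (by simpa using hv)]
      by_cases hs : s ∈ vs
      · rw [if_pos (by simpa using hs)]
        have hv' : v.contains k = false := by simpa using hv
        have hlt := fvnCnt_add_lt L v k hk hv'
        have hrec := ih (PySem.Set.add v k) (q ++ [k]) hsub'
        simp only [List.length_append, List.length_cons, List.length_nil] at hrec
        omega
      · rw [if_neg (by simpa using hs)]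
        exact ih v q hsub' 

-- A's outer 'while len(queue) > 0' loop
def fvnLoopA (graph : List (String × List String)) (visited : List String) (queue : List String) : List String :=
  match queue with
  | [] => visited
  | search :: rest =>
    if search = "svr" then visited
    else
      let r := fvnScanA search graph visited rest
      fvnLoopA graph r.1 r.2
termination_by queue.length + 2 * fvnCnt (graph.map Prod.fst) visited
decreasing_by
  have h := fvnScanA_meas (graph.map Prod.fst) search graph visited rest
      (fun p hp => List.mem_map_of_mem hp)
  simp only [List.length_cons]
  omega

def find_valid_nodes (graph : List (String × List String)) : List String :=
  fvnLoopA graph PySem.Set.empty ["out"]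

-- ===== PORT B =====
-- rev = {}; for key, value_set in graph.items(): for v in value_set: rev.setdefault(v, []).append(key)
def fvnRev (graph : List (String × List String)) : PySem.Dict String (List String) :=
  graph.foldl (fun d p => p.2.foldl (fun d v => d.modify v [] (· ++ [p.1])) d) PySem.Dict.empty

-- 'for key in rev.get(search, []): …' body, folded over (visited, nxt)
def fvnExpand (rev : PySem.Dict String (List String)) (s : String)
    (visited nxt : List String) : List String × List String :=
  (rev.getD s []).foldl
    (fun st k => if st.1.contains k then st else (PySem.Set.add st.1 k, st.2 ++ [k]))
    (visited, nxt)

-- 'for search in frontier: …' level pass; Sum.inl = the early 'return visited' on "svr"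
def fvnLevel (rev : PySem.Dict String (List String)) :
    List String → List String → List String → (List String) ⊕ (List String × List String)
  | [], visited, nxt => Sum.inr (visited, nxt)
  | s :: rest, visited, nxt =>
    if s = "svr" then Sum.inl visited
    else
      let e := fvnExpand rev s visited nxt
      fvnLevel rev rest e.1 e.2

-- ----- termination lemmas for the outer frontier loop -----
theorem fvnFoldl_meas (L : List String) :
    ∀ (nbrs v q : List String), (∀ k ∈ nbrs, k ∈ L) →
      (nbrs.foldl (fun st k => if st.1.contains k then st else (PySem.Set.add st.1 k, st.2 ++ [k]))
          (v, q)).2.length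
        + fvnCnt L (nbrs.foldl (fun st k => if st.1.contains k then st else (PySem.Set.add st.1 k, st.2 ++ [k])) (v, q)).1
        ≤ q.length + fvnCnt L v := by
  intro nbrs
  induction nbrs with
  | nil => intro v q _; simp
  | cons k rest ih =>
    intro v q hsub
    have hk : k ∈ L := hsub k (by simp)
    have hsub' : ∀ x ∈ rest, x ∈ L := fun x hx => hsub x (by simp [hx])
    simp only [List.foldl_cons]
    by_cases hc : k ∈ v
    · rw [if_pos (by simpa using hc)]
      exact ih v q hsub'
    · rw [if_neg (by simpa using hc)]
      have hc' : v.contains k = false := by simpa using hc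
      have hlt := fvnCnt_add_lt L v k hk hc'
      have hrec := ih (PySem.Set.add v k) (q ++ [k]) hsub'
      simp only [List.length_append, List.length_cons, List.length_nil] at hrec
      omega

theorem fvnMem_getD_values (d : PySem.Dict String (List String)) (s x : String)
    (h : x ∈ d.getD s []) : x ∈ d.values.flatten := by
  cases hg : d.get? s with
  | none =>
    rw [d.getD_of_get?_eq_none [] hg] at h
    cases h
  | some vs =>
    rw [d.getD_of_get?_eq_some [] hg] at h
    have : (s, vs) ∈ d.items := d.mem_items_of_get?_eq_some hg
    refine List.mem_flatten.2 ⟨vs, ?_, h⟩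
    simpa [PySem.Dict.values] using List.mem_map_of_mem (f := Prod.snd) this

theorem fvnLevel_meas (rev : PySem.Dict String (List String)) (L : List String)
    (hL : ∀ s k, k ∈ rev.getD s [] → k ∈ L) :
    ∀ (f v q w nq : List String), fvnLevel rev f v q = Sum.inr (w, nq) →
      nq.length + fvnCnt L w ≤ q.length + fvnCnt L v := by
  intro f
  induction f with
  | nil =>
    intro v q w nq h
    simp only [fvnLevel, Sum.inr.injEq, Prod.mk.injEq] at h
    obtain ⟨rfl, rfl⟩ := h
    exact le_refl _
  | cons s rest ih =>
    intro v q w nq h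
    by_cases hs : s = "svr"
    · simp [fvnLevel, hs] at h
    · simp only [fvnLevel, hs, if_false] at h
      have h1 := ih _ _ _ _ h
      have h2 := fvnFoldl_meas L (rev.getD s []) v q (fun k hk => hL s k hk)
      simp only [fvnExpand] at h1
      omega

-- B's outer 'while frontier' loop
def fvnOuter (rev : PySem.Dict String (List String)) (visited frontier : List String) : List String :=
  match frontier with
  | [] => visited
  | _ :: _ =>
    match h : fvnLevel rev frontier visited [] with
    | Sum.inl v => v
    | Sum.inr (v, nxt) => fvnOuter rev v nxt
termination_by 2 * (((PySem.Dict.values rev).flatten.filter (fun k => !visited.contains k)).length) + (if frontier = [] then 0 else 1)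
decreasing_by
  have hm := fvnLevel_meas rev ((PySem.Dict.values rev).flatten)
      (fun s k hk => fvnMem_getD_values rev s k hk) _ _ _ _ _ h
  simp only [List.length_nil, Nat.zero_add, fvnCnt] at hm
  by_cases hn : nxt = []
  · subst hn
    simp only [List.length_nil, Nat.zero_add] at hm
    simp only [reduceIte]
    omega
  · have hlen : 1 ≤ nxt.length := by
      cases nxt with
      | nil => exact absurd rfl hn
      | cons a t => simp
    rw [if_neg hn]
    simp only [reduceIte]
    omega

def find_valid_nodes_alt (graph : List (String × List String)) : List String :=
  fvnOuter (fvnRev graph) PySem.Set.empty ["out"]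

-- ===== PRECONDITION & SPEC =====
-- Pre_ admits exactly the association lists that faithfully represent A's Python input, a
-- dict[str, set[str]]: keys pairwise distinct (dict) and each value list duplicate-free (set);
-- a list with duplicate keys or duplicate set elements denotes no Python input of that type.
def Pre_find_valid_nodes (graph : List (String × List String)) : Prop :=
  (graph.map Prod.fst).Nodup ∧ ∀ p ∈ graph, p.2.Nodup
instance (graph : List (String × List String)) : Decidable (Pre_find_valid_nodes graph) := by
  unfold Pre_find_valid_nodes; infer_instance

def pvWitness_find_valid_nodes : (List (String × List String)) :=
  [("a", ["out"]), ("svr", ["a", "out"]), ("b", ["svr"])]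

def Spec_find_valid_nodes (graph : List (String × List String)) (out : List String) : Prop := out = find_valid_nodes_alt graph
instance (graph : List (String × List String)) (out : List String) : Decidable (Spec_find_valid_nodes graph out) := by unfold Spec_find_valid_nodes; infer_instance

-- ===== CLAIM (what is proved, stated in full; the proofs are below) =====
def Claim_equal_find_valid_nodes : Prop := ∀ (graph : List (String × List String)), Dom_find_valid_nodes graph → Pre_find_valid_nodes graph → Spec_find_valid_nodes graph (find_valid_nodes graph)

-- ===== LEMMAS AND PROOFS =====

-- keys of g (in order) whose value set contains s
def fvnKeysWith (s : String) (g : List (String × List String)) : List String :=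
  (g.filter (fun p => p.2.contains s)).map Prod.fst

theorem fvnRev_getD (s : String) :
    ∀ (g : List (String × List String)) (d : PySem.Dict String (List String)),
      (∀ p ∈ g, p.2.Nodup) →
      (g.foldl (fun d p => p.2.foldl (fun d v => d.modify v [] (· ++ [p.1])) d) d).getD s []
        = d.getD s [] ++ fvnKeysWith s g := by
  intro g
  induction g with
  | nil => intro d _; simp [fvnKeysWith]
  | cons p rest ih =>
    intro d hnd
    obtain ⟨k, vs⟩ := p
    have hvs : vs.Nodup := hnd (k, vs) (by simp)
    simp only [List.foldl_cons]
    rw [ih _ (fun p hp => hnd p (by simp [hp]))]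
    have h1 : vs.foldl (fun d v => d.modify v [] (· ++ [k])) d
        = (vs.map (fun v => (v, k))).foldl (fun d p => d.modify p.1 [] (· ++ [p.2])) d := by
      rw [List.foldl_map]
    rw [h1, PySem.Dict.getD_foldl_modify_append]
    have h2 : ((vs.map (fun v => (v, k))).filter (fun p => p.1 == s)).map (fun p => p.2)
        = if s ∈ vs then [k] else [] := by
      rw [List.filter_map]
      have h3 : (vs.filter (fun v => v == s)) = if s ∈ vs then [s] else [] := by
        have := List.filter_beq (l := vs) (a := s)
        by_cases hm : s ∈ vs
        · rw [if_pos hm]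
          have hc1 : vs.count s = 1 := List.count_eq_one_of_mem hvs hm
          simpa [hc1] using this
        · rw [if_neg hm]
          have hc0 : vs.count s = 0 := List.count_eq_zero_of_not_mem hm
          simpa [hc0] using this
      have h4 : (fun p : String × String => p.1 == s) ∘ (fun v => (v, k)) = (fun v => v == s) := rfl
      rw [h4, h3]
      by_cases hm : s ∈ vs <;> simp [hm]
    rw [h2]
    by_cases hm : s ∈ vs <;>
      simp [fvnKeysWith, hm, List.append_assoc]

-- A's inner scan is the fold of B's step over the keys containing s
theorem fvnScanA_eq_foldl (s : String) :
    ∀ (g : List (String × List String)) (v q : List String),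
      fvnScanA s g v q
        = (fvnKeysWith s g).foldl
            (fun st k => if st.1.contains k then st else (PySem.Set.add st.1 k, st.2 ++ [k]))
            (v, q) := by
  intro g
  induction g with
  | nil => intro v q; simp [fvnScanA, fvnKeysWith]
  | cons p rest ih =>
    intro v q
    obtain ⟨key, vset⟩ := p
    by_cases hs : s ∈ vset
    · by_cases hc : key ∈ v <;>
        simp [fvnScanA, fvnKeysWith, hs, hc, ih]
    · by_cases hc : key ∈ v <;>
        simp [fvnScanA, fvnKeysWith, hs, hc, ih]

theorem fvnFoldl_shift :
    ∀ (nbrs v pre q : List String),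
      nbrs.foldl (fun st k => if st.1.contains k then st else (PySem.Set.add st.1 k, st.2 ++ [k])) (v, pre ++ q)
        = ((nbrs.foldl (fun st k => if st.1.contains k then st else (PySem.Set.add st.1 k, st.2 ++ [k])) (v, q)).1,
           pre ++ (nbrs.foldl (fun st k => if st.1.contains k then st else (PySem.Set.add st.1 k, st.2 ++ [k])) (v, q)).2) := by
  intro nbrs
  induction nbrs with
  | nil => intro v pre q; simp
  | cons k rest ih =>
    intro v pre q
    by_cases hc : k ∈ v
    · simpa [hc] using ih v pre q
    · simpa [hc] using ih (PySem.Set.add v k) pre (q ++ [k])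

-- one level of A's queue processing is one fvnLevel pass
theorem fvnLoopA_level (g : List (String × List String)) (hv : ∀ p ∈ g, p.2.Nodup) :
    ∀ (f v q : List String),
      fvnLoopA g v (f ++ q)
        = (match fvnLevel (fvnRev g) f v q with
           | Sum.inl w => w
           | Sum.inr (w, nq) => fvnLoopA g w nq) := by
  intro f
  induction f with
  | nil => intro v q; simp [fvnLevel]
  | cons s rest ih =>
    intro v q
    have hrev : (fvnRev g).getD s [] = fvnKeysWith s g := by
      have := fvnRev_getD s g PySem.Dict.empty hv
      simpa [fvnRev, PySem.Dict.getD_empty] using this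
    by_cases hs : s = "svr"
    · conv_lhs => rw [List.cons_append, fvnLoopA.eq_def]
      simp [fvnLevel, hs]
    · have hscan : fvnScanA s g v (rest ++ q)
          = ((fvnExpand (fvnRev g) s v q).1, rest ++ (fvnExpand (fvnRev g) s v q).2) := by
        rw [fvnScanA_eq_foldl, fvnFoldl_shift]
        simp [fvnExpand, hrev]
      conv_lhs => rw [List.cons_append, fvnLoopA.eq_def]
      simp only [hs, if_false, hscan]
      rw [ih]
      simp [fvnLevel, hs]

-- A's whole loop equals B's frontier loop (fuel over the unvisited count)
theorem fvnLoop_eq (g : List (String × List String)) (hv : ∀ p ∈ g, p.2.Nodup) :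
    ∀ (n : Nat) (v f : List String),
      2 * fvnCnt ((PySem.Dict.values (fvnRev g)).flatten) v + 1 ≤ n →
      fvnLoopA g v f = fvnOuter (fvnRev g) v f := by
  intro n
  induction n with
  | zero => intro v f h; omega
  | succ n ih =>
    intro v f hn
    match f with
    | [] => rw [fvnLoopA, fvnOuter]
    | s :: rest =>
      have hsplit := fvnLoopA_level g hv (s :: rest) v []
      rw [List.append_nil] at hsplit
      rw [hsplit, fvnOuter]
      cases hE : fvnLevel (fvnRev g) (s :: rest) v [] with
      | inl w => rfl
      | inr p =>
        obtain ⟨w, nq⟩ := p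
        have hm := fvnLevel_meas (fvnRev g) ((PySem.Dict.values (fvnRev g)).flatten)
            (fun s k hk => fvnMem_getD_values (fvnRev g) s k hk) _ _ _ _ _ hE
        simp only [List.length_nil, Nat.zero_add] at hm
        match nq, hm with
        | [], hm =>
          show fvnLoopA g w [] = fvnOuter (fvnRev g) w []
          rw [fvnLoopA.eq_def, fvnOuter.eq_def]
        | x :: xs, hm =>
          show fvnLoopA g w (x :: xs) = fvnOuter (fvnRev g) w (x :: xs)
          apply ih
          simp only [List.length_cons] at hm
          omega

-- ===== VERDICT (by name: the statement is the Claim_ definition above) =====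
theorem find_valid_nodes_spec : Claim_equal_find_valid_nodes := by
  intro graph _ hpre
  unfold Spec_find_valid_nodes find_valid_nodes find_valid_nodes_alt
  exact fvnLoop_eq graph hpre.2
    (2 * fvnCnt ((PySem.Dict.values (fvnRev graph)).flatten) PySem.Set.empty + 1)
    PySem.Set.empty ["out"] (le_refl _)
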